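-- pv_equiv track=rewrite | github.com/laol-tomsk/essence | Database manager/NeoByseAPI/server_test/probabilistic_new_2.py | __prepare_the_vector__
-- ===== SOURCE A (Python) =====
-- def __prepare_the_vector__(manager_decision,len_parents):
-- 	mas = []
-- 	if manager_decision:
-- 		for a in range((2**len_parents)//2,2**len_parents):
-- 			bin_value = bin(a)
-- 			bin_value = bin_value[2:]
-- 			while len(bin_value) != len_parents:
-- 				bin_value='0'+bin_value
-- 			mas.append(bin_value)
-- 	else:
-- 		for a in range((2**len_parents)//2):
-- 			bin_value = bin(a)
-- 			bin_value = bin_value[2:]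
-- 			while len(bin_value) != len_parents:
-- 				bin_value='0'+bin_value
-- 			mas.append(bin_value)
-- 	return mas
-- ===== SOURCE B (Python) =====
-- def __prepare_the_vector__(manager_decision, len_parents):
--     strings = ['']
--     for _ in range(len_parents):
--         strings = [s + b for s in strings for b in '01']
--     half = len(strings) // 2
--     return strings[half:] if manager_decision else strings[:half]
-- ===== Notes on version B (the rewrite author's own statement) =====
-- stated objective: idiomatic
-- what changed: B generates all length-n bit strings directly by repeatedly extending each string with '0' and '1' (a Cartesian-product build in lexicographic order) and returns the upper or lower half by slicing, instead of A's decoding each integer of a range with bin() and zero-padding it in a while loop.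
import Mathlib
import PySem

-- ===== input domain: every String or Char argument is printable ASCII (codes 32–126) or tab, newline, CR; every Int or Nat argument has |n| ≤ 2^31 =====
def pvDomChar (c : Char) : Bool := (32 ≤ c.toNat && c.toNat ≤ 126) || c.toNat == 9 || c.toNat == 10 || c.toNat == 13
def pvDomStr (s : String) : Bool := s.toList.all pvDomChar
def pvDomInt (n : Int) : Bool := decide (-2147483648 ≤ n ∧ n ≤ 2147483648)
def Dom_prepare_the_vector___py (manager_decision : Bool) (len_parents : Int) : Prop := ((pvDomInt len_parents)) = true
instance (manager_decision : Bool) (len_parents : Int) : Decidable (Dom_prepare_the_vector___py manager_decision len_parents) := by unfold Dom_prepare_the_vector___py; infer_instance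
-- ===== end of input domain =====

-- B replaces A's integer-range + bin() decode + while-loop zero-padding by a direct
-- Cartesian-product build of all length-n bit strings followed by one half slice (idiomatic; same cost).

-- ===== PORT A =====
-- bin(a)[2:] for a ≥ 0, as a list of chars ('0' for a = 0)
def pvBinDigits : Nat → List Char
  | 0 => []
  | (n+1) => pvBinDigits ((n+1) / 2) ++ [if (n+1) % 2 = 1 then '1' else '0']
def pvBinStr (a : Nat) : List Char := if a = 0 then ['0'] else pvBinDigits a

-- the while loop "while len(bin_value) != len_parents: bin_value = '0'+bin_value";
-- fuel only makes it total (Python diverges when the initial length exceeds n; Pre_ keeps such inputs out)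
def pvPadLoop : Nat → Nat → List Char → List Char
  | 0, _, s => s
  | (fuel+1), n, s => if s.length ≠ n then pvPadLoop fuel n ('0' :: s) else s

-- exact for len_parents ≥ 0 (Pre_); Python raises TypeError on negative len_parents
def prepare_the_vector___py (manager_decision : Bool) (len_parents : Int) : List String :=
  let n := len_parents.toNat
  let body : List String → Nat → List String :=
    fun mas a => mas ++ [String.ofList (pvPadLoop (n + 1) n (pvBinStr a))]
  if manager_decision then
    (List.range' (2 ^ n / 2) (2 ^ n - 2 ^ n / 2)).foldl body []
  else
    (List.range (2 ^ n / 2)).foldl body []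

-- ===== PORT B =====
def prepare_the_vector___py_alt (manager_decision : Bool) (len_parents : Int) : List String :=
  let strings :=
    (List.range len_parents.toNat).foldl
      (fun acc _ => acc.flatMap (fun s => [s ++ "0", s ++ "1"])) [""]
  let half := strings.length / 2
  if manager_decision then strings.drop half else strings.take half

-- ===== PRECONDITION & SPEC =====
-- Pre_ excludes negative len_parents (A raises TypeError via range over the float 2**len_parents//2)
-- and truthy manager_decision with len_parents = 0 (A's padding while-loop never terminates there).
def Pre_prepare_the_vector___py (manager_decision : Bool) (len_parents : Int) : Prop :=
  0 ≤ len_parents ∧ (manager_decision = true → 1 ≤ len_parents)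
instance (manager_decision : Bool) (len_parents : Int) : Decidable (Pre_prepare_the_vector___py manager_decision len_parents) := by unfold Pre_prepare_the_vector___py; infer_instance
def pvWitness_prepare_the_vector___py : Bool × Int := (true, 3)

def Spec_prepare_the_vector___py (manager_decision : Bool) (len_parents : Int) (out : List String) : Prop := out = prepare_the_vector___py_alt manager_decision len_parents
instance (manager_decision : Bool) (len_parents : Int) (out : List String) : Decidable (Spec_prepare_the_vector___py manager_decision len_parents out) := by unfold Spec_prepare_the_vector___py; infer_instance

-- ===== CLAIM (what is proved, stated in full; the proofs are below) =====
def Claim_equal_prepare_the_vector___py : Prop := ∀ (manager_decision : Bool) (len_parents : Int), Dom_prepare_the_vector___py manager_decision len_parents → Pre_prepare_the_vector___py manager_decision len_parents → Spec_prepare_the_vector___py manager_decision len_parents (prepare_the_vector___py manager_decision len_parents)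

-- ===== LEMMAS AND PROOFS =====

-- closed form of the padding while-loop when it terminates
theorem pvPadLoop_eq (fuel n : Nat) : ∀ s : List Char, s.length ≤ n → n - s.length < fuel →
    pvPadLoop fuel n s = List.replicate (n - s.length) '0' ++ s := by
  induction fuel with
  | zero => intro s _ h; omega
  | succ f ih =>
    intro s hle hf
    simp only [pvPadLoop]
    by_cases h : s.length = n
    · simp [h]
    · rw [if_pos (by omega)]
      rw [ih ('0' :: s) (by simp; omega) (by simp; omega)]
      have : n - s.length = (n - ('0'::s).length) + 1 := by simp; omega
      rw [this, List.replicate_succ']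
      simp

theorem pvBinDigits_length_le (n : Nat) : ∀ a : Nat, a < 2 ^ n → (pvBinDigits a).length ≤ n := by
  induction n with
  | zero => intro a h; interval_cases a; simp [pvBinDigits]
  | succ n ih =>
    intro a h
    match a with
    | 0 => simp [pvBinDigits]
    | (m+1) =>
      rw [pvBinDigits]
      have := ih ((m+1)/2) (by omega)
      simp; omega

theorem pvBinStr_length_le (n a : Nat) (hn : 1 ≤ n) (ha : a < 2 ^ n) :
    (pvBinStr a).length ≤ n := by
  unfold pvBinStr
  match a with
  | 0 => simpa using hn
  | (m+1) => rw [if_neg (by omega)]; exact pvBinDigits_length_le n (m+1) ha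

-- the zero-padded bit string of a at width n, as a list of chars
def pvF (n a : Nat) : List Char := List.replicate (n - (pvBinStr a).length) '0' ++ pvBinStr a

theorem pvF_step (n q r : Nat) (hn : 1 ≤ n) (hq : q < 2 ^ n) (hr : r < 2) :
    pvF (n + 1) (2 * q + r) = pvF n q ++ [if r = 1 then '1' else '0'] := by
  match q with
  | 0 =>
    have hrep : List.replicate n '0' = List.replicate (n - 1) '0' ++ ['0'] := by
      rw [show n = (n - 1) + 1 by omega, List.replicate_succ']; simp
    interval_cases r <;> simp [pvF, pvBinStr, pvBinDigits, hrep]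
  | (p+1) =>
    have hne : 2 * (p + 1) + r ≠ 0 := by omega
    have hbd : pvBinDigits (2 * (p + 1) + r) = pvBinDigits (p + 1) ++ [if r = 1 then '1' else '0'] := by
      match h : 2 * (p + 1) + r, hne with
      | (m+1), _ =>
        rw [pvBinDigits]
        have h1 : (m + 1) / 2 = p + 1 := by omega
        have h2 : (m + 1) % 2 = r := by omega
        rw [h1, h2]
    have hlen : (pvBinDigits (p+1)).length ≤ n := pvBinDigits_length_le n (p+1) hq
    simp only [pvF, pvBinStr, if_neg hne, if_neg (by omega : ¬ p + 1 = 0), hbd]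
    simp only [List.length_append, List.length_singleton]
    rw [show n + 1 - ((pvBinDigits (p+1)).length + 1) = n - (pvBinDigits (p+1)).length by omega]
    simp

theorem pvRangeTwoMul (m : Nat) :
    List.range (2 * m) = (List.range m).flatMap (fun q => [2 * q, 2 * q + 1]) := by
  induction m with
  | zero => simp
  | succ m ih =>
    rw [show 2 * (m + 1) = (2 * m + 1) + 1 by omega, List.range_succ, List.range_succ,
      List.range_succ, ih]
    simp

-- B's generator loop at n, carried out on char lists
def pvGenL (n : Nat) : List (List Char) :=
  (List.range n).foldl (fun acc _ => acc.flatMap (fun s => [s ++ ['0'], s ++ ['1']])) [[]]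

theorem pvGen_eq_ofList (n : Nat) :
    (List.range n).foldl (fun acc _ => acc.flatMap (fun s => [s ++ "0", s ++ "1"])) [""]
      = (pvGenL n).map String.ofList := by
  induction n with
  | zero => simp [pvGenL]
  | succ n ih =>
    rw [pvGenL, List.range_succ, List.foldl_append, List.foldl_append, ← pvGenL, ih]
    simp [List.flatMap_map, List.map_flatMap, String.ofList_append]

theorem pvGenL_succ (n : Nat) :
    pvGenL (n + 1) = (pvGenL n).flatMap (fun s => [s ++ ['0'], s ++ ['1']]) := by
  rw [pvGenL, List.range_succ, List.foldl_append, ← pvGenL]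
  simp

theorem pvGenL_length (n : Nat) : (pvGenL n).length = 2 ^ n := by
  induction n with
  | zero => simp [pvGenL]
  | succ n ih =>
    rw [pvGenL_succ, List.length_flatMap]
    simp [ih, Nat.pow_succ]

theorem pvMain (n : Nat) (hn : 1 ≤ n) :
    (List.range (2 ^ n)).map (pvF n) = pvGenL n := by
  induction n with
  | zero => omega
  | succ n ih =>
    by_cases h : n = 0
    · subst h
      simp [pvGenL, List.range_succ, pvF, pvBinStr, pvBinDigits]
    · have hn1 : 1 ≤ n := by omega
      rw [pvGenL_succ, ← ih hn1, show 2 ^ (n+1) = 2 * 2 ^ n by ring, pvRangeTwoMul,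
        List.map_flatMap, List.flatMap_map]
      apply List.flatMap_congr
      intro q hq
      have hq' : q < 2 ^ n := List.mem_range.mp hq
      have h0 := pvF_step n q 0 hn1 hq' (by omega)
      have h1 := pvF_step n q 1 hn1 hq' (by omega)
      simp only [List.map_cons, List.map_nil]
      rw [show 2 * q = 2 * q + 0 from rfl] at h0 ⊢
      rw [h0, h1]
      simp

theorem pvDropRange (n m : Nat) (h : m ≤ n) :
    (List.range n).drop m = List.range' m (n - m) := by
  rw [show n = m + (n - m) by omega, List.range_add,
    List.drop_left' (by simp : (List.range m).length = m)]
  rw [List.range'_eq_map_range]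
  congr 2
  omega

-- the loop body of A maps a to its padded bit string, for a < 2^n (n ≥ 1)
theorem pvBody_eq (n a : Nat) (hn : 1 ≤ n) (ha : a < 2 ^ n) :
    String.ofList (pvPadLoop (n + 1) n (pvBinStr a)) = String.ofList (pvF n a) := by
  rw [pvPadLoop_eq (n + 1) n (pvBinStr a) (pvBinStr_length_le n a hn ha) (by omega), pvF]

theorem prepare_the_vector___py_spec : Claim_equal_prepare_the_vector___py := by
  intro md len _ hpre
  unfold Spec_prepare_the_vector___py
  obtain ⟨h0, h1⟩ := hpre
  obtain ⟨n, rfl⟩ : ∃ n : Nat, len = (n : Int) := ⟨len.toNat, (Int.toNat_of_nonneg h0).symm⟩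
  unfold prepare_the_vector___py prepare_the_vector___py_alt
  simp only [Int.toNat_natCast]
  rw [pvGen_eq_ofList n, List.length_map, pvGenL_length n]
  cases md with
  | true =>
    have hn1 : 1 ≤ n := by have := h1 rfl; exact_mod_cast this
    rw [if_pos rfl, if_pos rfl,
      PySem.List.foldl_append_singleton_eq_map
        (fun a => String.ofList (pvPadLoop (n + 1) n (pvBinStr a))),
      ← pvMain n hn1, ← List.map_drop, ← List.map_drop,
      pvDropRange (2 ^ n) (2 ^ n / 2) (Nat.div_le_self _ _), List.map_map]
    apply List.map_congr_left
    intro a ha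
    have := List.mem_range'.mp ha
    exact pvBody_eq n a hn1 (by omega)
  | false =>
    rw [if_neg (by simp), if_neg (by simp),
      PySem.List.foldl_append_singleton_eq_map
        (fun a => String.ofList (pvPadLoop (n + 1) n (pvBinStr a)))]
    by_cases hz : n = 0
    · subst hz; simp
    · have hn1 : 1 ≤ n := by omega
      rw [← pvMain n hn1, List.nil_append, ← List.map_take, ← List.map_take, List.take_range,
        min_eq_left (Nat.div_le_self _ _), List.map_map]
      apply List.map_congr_left
      intro a ha
      have := List.mem_range.mp ha
      exact pvBody_eq n a hn1 (by omega)
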